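-- pv_equiv track=rewrite | github.com/kcwww/Problem-Solving | 프로그래머스/unrated/140108. 문자열 나누기/문자열 나누기.py | solution
-- ===== SOURCE A (Python) =====
-- def solution(s):
--     answer = 0
--     str_len = len(s)
--     same = 0
--     diff = 0
--     char = s[0]
--     for i in range(str_len):
--         if (char == s[i]):
--             same += 1
--         else:
--             diff += 1
--         if (same == diff):
--             answer += 1
--             same = 0
--             diff = 0
--             if (i < (str_len - 1)):
--                 char = s[i + 1]
--     if (same != 0 or diff != 0):
--         answer += 1
--     return answer
-- ===== SOURCE B (Python) =====
-- def solution(s):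
--     char = s[0]
--     same = 0
--     diff = 0
--     for i, c in enumerate(s):
--         if char == c:
--             same += 1
--         else:
--             diff += 1
--         if same == diff:
--             rest = s[i + 1:]
--             return 1 + (solution(rest) if rest else 0)
--     return 1
-- ===== Notes on version B (the rewrite author's own statement) =====
-- stated objective: alternative
-- what changed: B replaces A's single anchor-reset loop carrying four pieces of state with a recursion over suffixes: scan the current segment until same==diff, cut, and recurse on the remaining suffix.
-- outside the precondition, e.g. on solution(''): A raises IndexError, B raises IndexError
import Mathlib
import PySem

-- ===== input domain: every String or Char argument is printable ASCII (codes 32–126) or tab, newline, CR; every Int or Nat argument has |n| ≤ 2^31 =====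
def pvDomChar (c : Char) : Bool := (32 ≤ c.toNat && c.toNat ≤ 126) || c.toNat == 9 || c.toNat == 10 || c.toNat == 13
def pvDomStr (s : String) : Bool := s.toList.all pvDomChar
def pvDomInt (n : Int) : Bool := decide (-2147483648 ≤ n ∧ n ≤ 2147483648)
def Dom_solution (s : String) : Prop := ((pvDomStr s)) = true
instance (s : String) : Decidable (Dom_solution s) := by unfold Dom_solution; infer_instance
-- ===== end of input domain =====

-- B re-implements A's single anchor-reset loop as a recursion over suffixes
-- (scan the current segment until same == diff, cut, recurse on the rest); same cost, different decomposition.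
-- Both raise IndexError on the empty string (s[0]); Pre_ excludes it.

-- ===== PORT A =====
-- the body of A's for-loop, on state (answer, same, diff, char) at index i
def aBody (cs : List Char) (strLen : Int) (st : Int × Int × Int × Char) (i : Int) :
    Int × Int × Int × Char :=
  let answer := st.1; let same := st.2.1; let diff := st.2.2.1; let char := st.2.2.2
  let c := (PySem.List.pyGet? cs i).getD ' '
  let same := if char = c then same + 1 else same
  let diff := if char = c then diff else diff + 1
  if same = diff then
    (answer + 1, 0, 0,
      if i < strLen - 1 then (PySem.List.pyGet? cs (i + 1)).getD char else char)
  else (answer, same, diff, char)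

-- literal port of A: fold over range(len(s)) carrying (answer, same, diff, char);
-- s[0] on the (Pre_-excluded) empty string is ported as .getD ' '.
def solution (s : String) : Int :=
  let cs := s.toList
  let strLen : Int := cs.length
  let st := (PySem.List.pyRange 0 strLen 1).foldl (aBody cs strLen)
      (0, 0, 0, (PySem.List.pyGet? cs 0).getD ' ')
  if st.2.1 ≠ 0 ∨ st.2.2.1 ≠ 0 then st.1 + 1 else st.1

-- ===== PORT B =====
-- scan of one segment: returns some rest when same == diff fires (rest = the suffix s[i+1:]),
-- none when the loop falls through.
def altScan (char : Char) (same diff : Int) : List Char → Option (List Char)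
  | [] => none
  | c :: rest =>
      let same := if char = c then same + 1 else same
      let diff := if char = c then diff else diff + 1
      if same = diff then some rest else altScan char same diff rest

theorem altScan_some_length {char : Char} {same diff : Int} :
    ∀ {cs rest : List Char}, altScan char same diff cs = some rest → rest.length < cs.length := by
  intro cs
  induction cs generalizing same diff with
  | nil => intro rest h; simp [altScan] at h
  | cons c t ih =>
      intro rest h
      simp only [altScan] at h
      by_cases hbal : (if char = c then same + 1 else same) = (if char = c then diff else diff + 1)
      · rw [if_pos hbal] at h; cases h; simp
      · rw [if_neg hbal] at h
        exact Nat.lt_trans (ih h) (by simp)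

-- literal port of Source B (recursion on the suffix after each cut)
def altGo (cs : List Char) : Int :=
  let char := cs.headD ' '
  match h : altScan char 0 0 cs with
  | none => 1
  | some rest => 1 + (if rest.isEmpty then 0 else altGo rest)
termination_by cs.length
decreasing_by exact altScan_some_length h

def solution_alt (s : String) : Int := altGo s.toList

-- ===== PRECONDITION & SPEC =====
-- A raises IndexError on the empty string (char = s[0]); so does B.
def Pre_solution (s : String) : Prop := s ≠ ""
instance (s : String) : Decidable (Pre_solution s) := by unfold Pre_solution; infer_instance
def pvWitness_solution : String := "banana"

def Spec_solution (s : String) (out : Int) : Prop := out = solution_alt s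
instance (s : String) (out : Int) : Decidable (Spec_solution s out) := by unfold Spec_solution; infer_instance

-- ===== CLAIM (what is proved, stated in full; the proofs are below) =====
def Claim_equal_solution : Prop := ∀ (s : String), Dom_solution s → Pre_solution s → Spec_solution s (solution s)

-- ===== LEMMAS AND PROOFS =====

-- A's loop rephrased as a structural recursion on the list (proof intermediary).
def aLoop (ans same diff : Int) (char : Char) : List Char → Int
  | [] => if same ≠ 0 ∨ diff ≠ 0 then ans + 1 else ans
  | c :: rest =>
      let same' := if char = c then same + 1 else same
      let diff' := if char = c then diff else diff + 1
      if same' = diff' then aLoop (ans + 1) 0 0 (rest.headD char) rest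
      else aLoop ans same' diff' char rest

theorem aLoop_of_altScan_none :
    ∀ (cs : List Char) (char : Char) (same diff ans : Int),
      altScan char same diff cs = none → (same ≠ diff ∨ cs ≠ []) →
      aLoop ans same diff char cs = ans + 1 := by
  intro cs
  induction cs with
  | nil =>
      intro char same diff ans _ hside
      have hne : same ≠ diff := by
        rcases hside with h | h
        · exact h
        · simp at h
      simp only [aLoop]
      rw [if_pos]
      rcases eq_or_ne same 0 with rfl | hs
      · exact Or.inr fun hd => hne hd.symm
      · exact Or.inl hs
  | cons c t ih =>
      intro char same diff ans hscan _
      simp only [altScan] at hscan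
      simp only [aLoop]
      by_cases hbal : (if char = c then same + 1 else same) = (if char = c then diff else diff + 1)
      · rw [if_pos hbal] at hscan; exact absurd hscan (by simp)
      · rw [if_neg hbal] at hscan
        rw [if_neg hbal]
        exact ih _ _ _ _ hscan (Or.inl hbal)

theorem aLoop_of_altScan_some :
    ∀ (cs : List Char) (char : Char) (same diff ans : Int) (rest : List Char),
      altScan char same diff cs = some rest →
      aLoop ans same diff char cs = aLoop (ans + 1) 0 0 (rest.headD char) rest := by
  intro cs
  induction cs with
  | nil => intro char same diff ans rest h; simp [altScan] at h
  | cons c t ih =>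
      intro char same diff ans rest hscan
      simp only [altScan] at hscan
      simp only [aLoop]
      by_cases hbal : (if char = c then same + 1 else same) = (if char = c then diff else diff + 1)
      · rw [if_pos hbal] at hscan
        rw [if_pos hbal]
        cases hscan
        rfl
      · rw [if_neg hbal] at hscan
        rw [if_neg hbal]
        exact ih _ _ _ _ _ hscan

theorem aLoop_eq_altGo :
    ∀ (n : Nat) (cs : List Char), cs.length ≤ n → cs ≠ [] →
      ∀ ans, aLoop ans 0 0 (cs.headD ' ') cs = ans + altGo cs := by
  intro n
  induction n with
  | zero => intro cs h hne; cases cs <;> simp_all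
  | succ n ih =>
      intro cs hlen hne ans
      rw [altGo]
      cases hscan : altScan (cs.headD ' ') 0 0 cs with
      | none =>
          rw [aLoop_of_altScan_none cs _ 0 0 ans hscan (Or.inr hne)]
      | some rest =>
          rw [aLoop_of_altScan_some cs _ 0 0 ans rest hscan]
          by_cases hr : rest = []
          · subst hr; simp [aLoop]
          · have hlt := altScan_some_length hscan
            have hhead : rest.headD (cs.headD ' ') = rest.headD ' ' := by
              cases rest
              · exact absurd rfl hr
              · rfl
            rw [hhead, ih rest (by omega) hr (ans + 1)]
            simp only [List.isEmpty_iff, if_neg hr]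
            ring

-- the fold over range(j, len) started on the suffix drop j computes aLoop on that suffix
theorem fold_eq_aLoop (cs : List Char) :
    ∀ (t : List Char) (j : Nat), cs.drop j = t →
      ∀ (ans same diff : Int) (char : Char),
        (if ((PySem.List.pyRange (j : Int) (cs.length : Int) 1).foldl
              (aBody cs (cs.length : Int)) (ans, same, diff, char)).2.1 ≠ 0 ∨
            ((PySem.List.pyRange (j : Int) (cs.length : Int) 1).foldl
              (aBody cs (cs.length : Int)) (ans, same, diff, char)).2.2.1 ≠ 0
         then ((PySem.List.pyRange (j : Int) (cs.length : Int) 1).foldl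
              (aBody cs (cs.length : Int)) (ans, same, diff, char)).1 + 1
         else ((PySem.List.pyRange (j : Int) (cs.length : Int) 1).foldl
              (aBody cs (cs.length : Int)) (ans, same, diff, char)).1) =
        aLoop ans same diff char t := by
  intro t
  induction t with
  | nil =>
      intro j hdrop ans same diff char
      have hj : cs.length ≤ j := by
        by_contra h
        have := List.drop_eq_nil_iff.mp hdrop
        omega
      rw [PySem.List.pyRange_one_eq_nil (by exact_mod_cast hj)]
      simp [aLoop]
  | cons c rest ih =>
      intro j hdrop ans same diff char
      have hj : j < cs.length := by
        by_contra h
        rw [List.drop_eq_nil_iff.mpr (by omega)] at hdrop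
        exact (List.cons_ne_nil c rest) hdrop.symm
      have hget? : cs[j]? = some c := by
        rw [← List.head?_drop, hdrop]; rfl
      have hc : (PySem.List.pyGet? cs (j : Int)).getD ' ' = c := by
        rw [PySem.List.pyGet?_natCast, hget?]; rfl
      have hdrop' : cs.drop (j + 1) = rest := by
        rw [← List.tail_drop, hdrop]; rfl
      have hstep : ((j : Int) + 1) = ((j + 1 : Nat) : Int) := by push_cast; ring
      rw [PySem.List.pyRange_one_cons (by exact_mod_cast hj)]
      simp only [List.foldl_cons]
      have happ : aBody cs (cs.length : Int) (ans, same, diff, char) (j : Int) =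
          (if (if char = c then same + 1 else same) = (if char = c then diff else diff + 1) then
            ((ans + 1 : Int), (0 : Int), (0 : Int),
              if (j : Int) < (cs.length : Int) - 1 then (PySem.List.pyGet? cs ((j : Int) + 1)).getD char else char)
          else (ans, (if char = c then same + 1 else same), (if char = c then diff else diff + 1), char)) := by
        unfold aBody
        rw [hc]
      rw [happ]
      by_cases hbal : (if char = c then same + 1 else same) = (if char = c then diff else diff + 1)
      · rw [if_pos hbal]
        have hchar : (if (j : Int) < (cs.length : Int) - 1
              then (PySem.List.pyGet? cs ((j : Int) + 1)).getD char else char)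
            = rest.headD char := by
          by_cases hlast : j + 1 < cs.length
          · rw [if_pos (by omega : (j : Int) < (cs.length : Int) - 1)]
            have hgr : cs[j + 1]? = rest.head? := by
              rw [← List.head?_drop, hdrop']
            rw [hstep, PySem.List.pyGet?_natCast, hgr]
            cases rest with
            | nil => exact absurd (List.drop_eq_nil_iff.mp hdrop') (by omega)
            | cons r rs => rfl
          · rw [if_neg (by omega : ¬ ((j : Int) < (cs.length : Int) - 1))]
            cases rest with
            | nil => rfl
            | cons r rs =>
                exfalso
                rw [List.drop_eq_nil_iff.mpr (by omega : cs.length ≤ j + 1)] at hdrop'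
                exact (List.cons_ne_nil r rs) hdrop'.symm
        rw [hchar, hstep, ih (j + 1) hdrop' (ans + 1) 0 0 (rest.headD char)]
        simp only [aLoop, if_pos hbal]
      · rw [if_neg hbal]
        rw [hstep, ih (j + 1) hdrop' ans _ _ char]
        simp only [aLoop, if_neg hbal]

-- ===== VERDICT (by name: the statement is the Claim_ definition above) =====
theorem solution_spec : Claim_equal_solution := by
  intro s _ hpre
  unfold Spec_solution solution solution_alt
  have hne : s.toList ≠ [] := by
    intro h
    exact hpre (by simp_all)
  have h0 : (PySem.List.pyGet? s.toList 0).getD ' ' = s.toList.headD ' ' := by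
    cases s.toList with
    | nil => rfl
    | cons c t => simp [PySem.List.pyGet?, PySem.List.pyIdx?]
  have hfold := fold_eq_aLoop s.toList s.toList 0 rfl 0 0 0 (s.toList.headD ' ')
  simp only [Nat.cast_zero] at hfold
  simp only [h0]
  rw [hfold, aLoop_eq_altGo s.toList.length s.toList le_rfl hne 0]
  ring
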